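-- pv_equiv track=rewrite | github.com/masonfed/desync_index | analyze_seeg_features/generate_label.py | generate_seeg_labels
-- ===== SOURCE A (Python) =====
-- def generate_seeg_labels(multi_variable, patient):
--
--     multi_epoch = []
--
--     multi_patient = []
--
--     multi_legend = []
--
--     multi_group = []
--
--     multi_time_start = []
--
--     multi_time_duration = []
--
--     if multi_variable == 'patient':
--
--         rep = 5
--         duration = 40
--
--         multi_patient += [patient for _ in range(1 + 5 * rep)]
--
--         multi_epoch += ['seizure_0' for _ in range(1)] +\
--             ['awake_0' for _ in range(rep)] +\
--                 ['asleep_0' for _ in range(rep)] +\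
--                     ['awake_1' for _ in range(rep)] +\
--                         ['asleep_1' for _ in range(rep)] +\
--                             ['hyperpnea_0' for _ in range(rep)]
--
--         multi_time_start += [160 for _ in range(1)] +\
--             [i*duration for i in range(rep)] +\
--                 [i*duration for i in range(rep)] +\
--                     [i*duration for i in range(rep)] +\
--                         [i*duration for i in range(rep)] +\
--                             [i*duration for i in range(rep)]
--
--         multi_time_duration += [40 for _ in range(1)] +\
--             [duration for _ in range(rep)] +\
--                 [duration for _ in range(rep)] +\
--                     [duration for _ in range(rep)] +\
--                         [duration for _ in range(rep)] +\
--                             [duration for _ in range(rep)]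
--
--         multi_legend += ['ICTAL'] +\
--             ['AWAKE' for _ in range(rep)]+\
--                 ['ASLEEP' for _ in range(rep)]+\
--                     ['AWAKE 1' for _ in range(rep)]+\
--                         ['ASLEEP 1' for _ in range(rep)]+\
--                             ['HYPERPNEA' for _ in range(rep)]
--
--         group = ''
--
--         for y in [x.upper()[0] for x in list(patient.split('_'))]:
--
--             group += y + '.'
--
--         multi_group += [group for _ in range(1 + 5* rep)]
--
--     else:
--         raise ValueError
--
--     return multi_epoch, multi_patient, multi_legend, multi_group, multi_time_start, multi_time_duration
-- ===== SOURCE B (Python) =====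
-- def generate_seeg_labels(multi_variable, patient):
--     if multi_variable != 'patient':
--         raise ValueError
--     duration = 40
--     group = ''.join(seg.upper()[0] + '.' for seg in patient.split('_'))
--     rows = [('seizure_0', 'ICTAL', 160)]
--     for epoch, legend in [('awake_0', 'AWAKE'), ('asleep_0', 'ASLEEP'),
--                           ('awake_1', 'AWAKE 1'), ('asleep_1', 'ASLEEP 1'),
--                           ('hyperpnea_0', 'HYPERPNEA')]:
--         rows += [(epoch, legend, i * duration) for i in range(5)]
--     epochs, patients, legends, groups, starts, durations = [], [], [], [], [], []
--     for epoch, legend, start in rows: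
--         epochs.append(epoch)
--         patients.append(patient)
--         legends.append(legend)
--         groups.append(group)
--         starts.append(start)
--         durations.append(duration)
--     return epochs, patients, legends, groups, starts, durations
-- ===== Notes on version B (the rewrite author's own statement) =====
-- stated objective: simpler
-- what changed: Replaces the six independently-built literal list concatenations with one row table (epoch, legend, time_start) driven by a single loop that appends to all six parallel lists at once, and computes the group string once with str.join instead of a manual accumulator loop.
import Mathlib
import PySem

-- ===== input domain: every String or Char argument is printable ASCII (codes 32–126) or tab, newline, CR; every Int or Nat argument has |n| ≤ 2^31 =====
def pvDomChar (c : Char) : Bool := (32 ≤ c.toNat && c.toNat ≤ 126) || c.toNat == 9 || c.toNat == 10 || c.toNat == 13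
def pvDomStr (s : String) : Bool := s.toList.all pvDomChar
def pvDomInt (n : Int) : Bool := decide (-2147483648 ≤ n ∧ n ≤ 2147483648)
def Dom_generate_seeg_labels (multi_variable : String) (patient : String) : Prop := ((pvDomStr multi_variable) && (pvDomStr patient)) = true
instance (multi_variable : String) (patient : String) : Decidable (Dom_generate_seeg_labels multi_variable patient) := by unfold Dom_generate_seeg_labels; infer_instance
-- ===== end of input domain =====

-- B replaces the six independently-built literal list concatenations with one (epoch, legend, time_start)
-- row table driven by a single loop appending to all six parallel lists, and builds the group string with
-- ''.join instead of a manual accumulator loop; objective: simpler.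

-- x.upper()[0] as both Pythons write it: first char of the uppercased string, as a one-char string.
-- The getD "" branch is reached only when the segment is empty, where Python raises IndexError (excluded by Pre_).
def pvFirstUpper (x : String) : String :=
  ((PySem.Str.pyGet? (PySem.Str.upper x) 0).map (fun c => String.ofList [c])).getD ""

-- ===== PORT A =====
-- A's group-accumulation loop: for y in [x.upper()[0] for x in list(patient.split('_'))]: group += y + '.'
-- ('_' ≠ "", so split? is always `some`; getD [] is the total form.)
def pvGroupA (patient : String) : String :=
  (((PySem.Str.split? patient "_").getD []).map (fun x => pvFirstUpper x)).foldl
    (fun g y => g ++ y ++ ".") ""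

def generate_seeg_labels (multi_variable : String) (patient : String) :
    List String × List String × List String × List String × List Int × List Int :=
  let multi_epoch : List String := []
  let multi_patient : List String := []
  let multi_legend : List String := []
  let multi_group : List String := []
  let multi_time_start : List Int := []
  let multi_time_duration : List Int := []
  if multi_variable == "patient" then
    let rep : Int := 5
    let duration : Int := 40
    let multi_patient := multi_patient ++ (PySem.List.pyRange 0 (1 + 5 * rep) 1).map (fun _ => patient)
    let multi_epoch := multi_epoch ++
      ((PySem.List.pyRange 0 1 1).map (fun _ => "seizure_0") ++
        (PySem.List.pyRange 0 rep 1).map (fun _ => "awake_0") ++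
          (PySem.List.pyRange 0 rep 1).map (fun _ => "asleep_0") ++
            (PySem.List.pyRange 0 rep 1).map (fun _ => "awake_1") ++
              (PySem.List.pyRange 0 rep 1).map (fun _ => "asleep_1") ++
                (PySem.List.pyRange 0 rep 1).map (fun _ => "hyperpnea_0"))
    let multi_time_start := multi_time_start ++
      ((PySem.List.pyRange 0 1 1).map (fun _ => (160 : Int)) ++
        (PySem.List.pyRange 0 rep 1).map (fun i => i * duration) ++
          (PySem.List.pyRange 0 rep 1).map (fun i => i * duration) ++
            (PySem.List.pyRange 0 rep 1).map (fun i => i * duration) ++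
              (PySem.List.pyRange 0 rep 1).map (fun i => i * duration) ++
                (PySem.List.pyRange 0 rep 1).map (fun i => i * duration))
    let multi_time_duration := multi_time_duration ++
      ((PySem.List.pyRange 0 1 1).map (fun _ => (40 : Int)) ++
        (PySem.List.pyRange 0 rep 1).map (fun _ => duration) ++
          (PySem.List.pyRange 0 rep 1).map (fun _ => duration) ++
            (PySem.List.pyRange 0 rep 1).map (fun _ => duration) ++
              (PySem.List.pyRange 0 rep 1).map (fun _ => duration) ++
                (PySem.List.pyRange 0 rep 1).map (fun _ => duration))
    let multi_legend := multi_legend ++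
      (["ICTAL"] ++
        (PySem.List.pyRange 0 rep 1).map (fun _ => "AWAKE") ++
          (PySem.List.pyRange 0 rep 1).map (fun _ => "ASLEEP") ++
            (PySem.List.pyRange 0 rep 1).map (fun _ => "AWAKE 1") ++
              (PySem.List.pyRange 0 rep 1).map (fun _ => "ASLEEP 1") ++
                (PySem.List.pyRange 0 rep 1).map (fun _ => "HYPERPNEA"))
    let group := pvGroupA patient
    let multi_group := multi_group ++ (PySem.List.pyRange 0 (1 + 5 * rep) 1).map (fun _ => group)
    (multi_epoch, multi_patient, multi_legend, multi_group, multi_time_start, multi_time_duration)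
  else
    -- Python: raise ValueError (excluded by Pre_)
    ([], [], [], [], [], [])

-- ===== PORT B =====
-- B's group: ''.join(seg.upper()[0] + '.' for seg in patient.split('_'))
def pvGroupB (patient : String) : String :=
  PySem.Str.join "" (((PySem.Str.split? patient "_").getD []).map (fun seg => pvFirstUpper seg ++ "."))

def generate_seeg_labels_alt (multi_variable : String) (patient : String) :
    List String × List String × List String × List String × List Int × List Int :=
  if multi_variable != "patient" then
    -- Python: raise ValueError (excluded by Pre_)
    ([], [], [], [], [], [])
  else
    let duration : Int := 40
    let group := pvGroupB patient
    let rows : List (String × String × Int) :=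
      [("seizure_0", "ICTAL", 160)] ++
        ([("awake_0", "AWAKE"), ("asleep_0", "ASLEEP"), ("awake_1", "AWAKE 1"),
          ("asleep_1", "ASLEEP 1"), ("hyperpnea_0", "HYPERPNEA")].flatMap
          (fun el => (PySem.List.pyRange 0 5 1).map (fun i => (el.1, el.2, i * duration))))
    let r : List String × List String × List String × List String × List Int × List Int :=
      rows.foldl
        (fun acc row =>
          match acc, row with
          | (es, ps, ls, gs, ss, ds), (ep, leg, ts) =>
            (es ++ [ep], ps ++ [patient], ls ++ [leg], gs ++ [group], ss ++ [ts], ds ++ [duration]))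
        ([], [], [], [], [], [])
    r

-- ===== PRECONDITION & SPEC =====
-- Pre_ excludes exactly the inputs where A raises: multi_variable ≠ 'patient' (ValueError) and
-- patients with an empty '_'-separated segment (empty patient, leading/trailing '_', or '__'),
-- where x.upper()[0] raises IndexError.
def Pre_generate_seeg_labels (multi_variable : String) (patient : String) : Prop :=
  multi_variable = "patient" ∧ patient.toList ≠ [] ∧ patient.toList.head? ≠ some '_' ∧
    patient.toList.getLast? ≠ some '_' ∧ ∀ q ∈ patient.toList.zip patient.toList.tail, q ≠ ('_', '_')
instance (multi_variable : String) (patient : String) : Decidable (Pre_generate_seeg_labels multi_variable patient) := by unfold Pre_generate_seeg_labels; infer_instance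

def pvWitness_generate_seeg_labels : String × String := ("patient", "pt_one")

def Spec_generate_seeg_labels (multi_variable : String) (patient : String) (out : List String × List String × List String × List String × List Int × List Int) : Prop := out = generate_seeg_labels_alt multi_variable patient
instance (multi_variable : String) (patient : String) (out : List String × List String × List String × List String × List Int × List Int) : Decidable (Spec_generate_seeg_labels multi_variable patient out) := by unfold Spec_generate_seeg_labels; infer_instance

-- ===== CLAIM (what is proved, stated in full; the proofs are below) =====
def Claim_equal_generate_seeg_labels : Prop := ∀ (multi_variable : String) (patient : String), Dom_generate_seeg_labels multi_variable patient → Pre_generate_seeg_labels multi_variable patient → Spec_generate_seeg_labels multi_variable patient (generate_seeg_labels multi_variable patient)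

-- ===== LEMMAS AND PROOFS =====

-- literal values of the four fixed output lists (proof-only)
def pvEpochs : List String := ["seizure_0", "awake_0", "awake_0", "awake_0", "awake_0", "awake_0", "asleep_0", "asleep_0", "asleep_0", "asleep_0", "asleep_0", "awake_1", "awake_1", "awake_1", "awake_1", "awake_1", "asleep_1", "asleep_1", "asleep_1", "asleep_1", "asleep_1", "hyperpnea_0", "hyperpnea_0", "hyperpnea_0", "hyperpnea_0", "hyperpnea_0"]
def pvLegends : List String := ["ICTAL", "AWAKE", "AWAKE", "AWAKE", "AWAKE", "AWAKE", "ASLEEP", "ASLEEP", "ASLEEP", "ASLEEP", "ASLEEP", "AWAKE 1", "AWAKE 1", "AWAKE 1", "AWAKE 1", "AWAKE 1", "ASLEEP 1", "ASLEEP 1", "ASLEEP 1", "ASLEEP 1", "ASLEEP 1", "HYPERPNEA", "HYPERPNEA", "HYPERPNEA", "HYPERPNEA", "HYPERPNEA"]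
def pvStarts : List Int := [160, 0, 40, 80, 120, 160, 0, 40, 80, 120, 160, 0, 40, 80, 120, 160, 0, 40, 80, 120, 160, 0, 40, 80, 120, 160]
def pvDurs : List Int := [40, 40, 40, 40, 40, 40, 40, 40, 40, 40, 40, 40, 40, 40, 40, 40, 40, 40, 40, 40, 40, 40, 40, 40, 40, 40]

lemma pv_intercalate_nil_cons (a : List Char) (l : List (List Char)) :
    ([] : List Char).intercalate (a :: l) = a ++ ([] : List Char).intercalate l := by
  cases l <;> simp [List.intercalate, List.intersperse]

-- A's accumulation loop equals prepending the accumulator to the joined dotted pieces.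
lemma pv_foldl_dot (l : List String) (g : String) :
    l.foldl (fun g y => g ++ y ++ ".") g = g ++ PySem.Str.join "" (l.map (fun y => y ++ ".")) := by
  induction l generalizing g with
  | nil =>
    apply String.toList_inj.mp
    simp [pysem]
  | cons a t ih =>
    simp only [List.foldl_cons, List.map_cons, ih]
    apply String.toList_inj.mp
    simp only [String.toList_append, PySem.Str.toList_join, List.map_cons, PySem.Chars.join]
    rw [show ("".toList : List Char) = [] from rfl, pv_intercalate_nil_cons]
    simp [List.append_assoc]

lemma pv_group_eq (patient : String) : pvGroupA patient = pvGroupB patient := by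
  unfold pvGroupA pvGroupB
  rw [pv_foldl_dot]
  apply String.toList_inj.mp
  simp only [List.map_map, String.toList_append, PySem.Str.toList_join]
  rfl

-- B's single loop over the row table, as six appended map passes.
lemma pv_foldl_rows (patient group : String) (duration : Int)
    (rows : List (String × String × Int))
    (es ps ls gs : List String) (ss ds : List Int) :
    rows.foldl
      (fun acc row =>
        match acc, row with
        | (es, ps, ls, gs, ss, ds), (ep, leg, ts) =>
          (es ++ [ep], ps ++ [patient], ls ++ [leg], gs ++ [group], ss ++ [ts], ds ++ [duration]))
      (es, ps, ls, gs, ss, ds) =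
    (es ++ rows.map (·.1), ps ++ rows.map (fun _ => patient), ls ++ rows.map (·.2.1),
      gs ++ rows.map (fun _ => group), ss ++ rows.map (·.2.2), ds ++ rows.map (fun _ => duration)) := by
  induction rows generalizing es ps ls gs ss ds with
  | nil => simp
  | cons r t ih => cases r with | mk ep rest => cases rest with | mk leg ts =>
      simp [ih, List.append_assoc]

set_option maxHeartbeats 1000000 in
lemma pv_A_eval (p : String) : generate_seeg_labels "patient" p =
    (pvEpochs, List.replicate 26 p, pvLegends, List.replicate 26 (pvGroupA p), pvStarts, pvDurs) := by
  refine Prod.ext ?_ (Prod.ext ?_ (Prod.ext ?_ (Prod.ext ?_ (Prod.ext ?_ ?_)))) <;> rfl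

set_option maxHeartbeats 1000000 in
lemma pv_B_eval (p : String) : generate_seeg_labels_alt "patient" p =
    (pvEpochs, List.replicate 26 p, pvLegends, List.replicate 26 (pvGroupB p), pvStarts, pvDurs) := by
  simp only [generate_seeg_labels_alt]
  rw [pv_foldl_rows]
  refine Prod.ext ?_ (Prod.ext ?_ (Prod.ext ?_ (Prod.ext ?_ (Prod.ext ?_ ?_)))) <;> rfl

-- ===== VERDICT (by name: the statement is the Claim_ definition above) =====
theorem generate_seeg_labels_spec : Claim_equal_generate_seeg_labels := by
  intro multi_variable patient _ hpre
  obtain ⟨hmv, -⟩ := hpre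
  subst hmv
  unfold Spec_generate_seeg_labels
  rw [pv_A_eval, pv_B_eval, pv_group_eq]
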